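-- pv_equiv track=rewrite | github.com/lewelyn7/Python-subtitles-translator | srt_parsing_modules/srt_parser.py | line_to_tokens
-- ===== SOURCE A (Python) =====
-- def clean_line(line):
--     cleaned_line=""
--     for letter in line:
--         if letter in ",;:\'1234567890#@$^%&*`~\\(<{[)>}]\"\n":
--             continue
--         elif letter in "-=+_":
--             cleaned_line = cleaned_line + " "
--         elif letter in "?.!":
--             cleaned_line = cleaned_line + " " + letter
--         else:
--             cleaned_line = cleaned_line + letter
--
--     return cleaned_line
--
-- def line_to_tokens(line):
--     if len(line) < 1:
--         yield from[]
--     cleaned_line = clean_line(line)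
--     if len(cleaned_line) < 1:
--         yield from[]
--     for token in cleaned_line.split(" "):
--         if len(token) > 0:
--             yield token
-- ===== SOURCE B (Python) =====
-- REMOVE = set(",;:'1234567890#@$^%&*`~\\(<{[)>}]\"\n")
-- PUNCT = set("?.!")
-- SEP = set(" -=+_")
--
-- def line_to_tokens(line):
--     buf = ""
--     for ch in line:
--         if ch in REMOVE:
--             continue
--         elif ch in SEP:
--             if buf:
--                 yield buf
--             buf = ""
--         elif ch in PUNCT:
--             if buf:
--                 yield buf
--             buf = ch
--         else:
--             buf += ch
--     if buf:
--         yield buf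
-- ===== Notes on version B (the rewrite author's own statement) =====
-- stated objective: alternative
-- what changed: B fuses A's two phases (build a cleaned string, then split on spaces and filter empties) into a single streaming pass over the input that maintains a current-token buffer and yields tokens directly, with no clean_line helper and no intermediate string.
import Mathlib
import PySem

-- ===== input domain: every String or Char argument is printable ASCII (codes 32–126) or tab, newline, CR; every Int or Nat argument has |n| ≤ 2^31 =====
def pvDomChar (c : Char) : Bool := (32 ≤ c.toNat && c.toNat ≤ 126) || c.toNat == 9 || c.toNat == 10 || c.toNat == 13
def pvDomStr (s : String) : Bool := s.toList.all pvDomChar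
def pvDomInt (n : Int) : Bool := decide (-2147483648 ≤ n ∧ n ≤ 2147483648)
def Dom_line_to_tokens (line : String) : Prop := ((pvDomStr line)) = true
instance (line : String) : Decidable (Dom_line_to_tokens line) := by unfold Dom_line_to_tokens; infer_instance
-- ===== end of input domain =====

-- B fuses A's clean-then-split two-phase pipeline into one streaming pass with a token buffer
-- (no intermediate cleaned string); objective: an alternative decomposition, same return value.

-- ===== PORT A =====
def ltRemove : List Char := ",;:'1234567890#@$^%&*`~\\(<{[)>}]\"\n".toList

-- clean_line: fold over the characters, building the cleaned string (as List Char)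
def cleanLine (line : List Char) : List Char :=
  line.foldl (fun acc c =>
    if c ∈ ltRemove then acc
    else if c ∈ "-=+_".toList then acc ++ [' ']
    else if c ∈ "?.!".toList then acc ++ [' ', c]
    else acc ++ [c]) []

-- the two "if len(..) < 1: yield from []" lines in A yield nothing, so they are no-ops
def line_to_tokens (line : String) : List String :=
  ((PySem.Chars.splitOn (cleanLine line.toList) [' ']).filter
    (fun t => decide (0 < t.length))).map String.ofList

-- ===== PORT B =====
def bRemove : List Char := PySem.Set.ofList ",;:'1234567890#@$^%&*`~\\(<{[)>}]\"\n".toList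
def bSep : List Char := PySem.Set.ofList " -=+_".toList
def bPunct : List Char := PySem.Set.ofList "?.!".toList

-- the single pass: skip removal chars, flush on separators, restart the buffer on ?.!
def bLoop : List Char → List Char → List String
  | [], buf => if buf = [] then [] else [String.ofList buf]
  | c :: rest, buf =>
    if c ∈ bRemove then bLoop rest buf
    else if c ∈ bSep then (if buf = [] then [] else [String.ofList buf]) ++ bLoop rest []
    else if c ∈ bPunct then (if buf = [] then [] else [String.ofList buf]) ++ bLoop rest [c]
    else bLoop rest (buf ++ [c])

def line_to_tokens_alt (line : String) : List String := bLoop line.toList []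

-- ===== PRECONDITION & SPEC =====
def Spec_line_to_tokens (line : String) (out : List String) : Prop := out = line_to_tokens_alt line
instance (line : String) (out : List String) : Decidable (Spec_line_to_tokens line out) := by unfold Spec_line_to_tokens; infer_instance

-- ===== CLAIM (what is proved, stated in full; the proofs are below) =====
def Claim_equal_line_to_tokens : Prop := ∀ (line : String), Dom_line_to_tokens line → Spec_line_to_tokens line (line_to_tokens line)

-- ===== LEMMAS AND PROOFS =====

-- accumulator-free characterization of splitting on a single space
def pvS : List Char → List Char → List (List Char)
  | cur, [] => [cur]
  | cur, c :: rest => if c = ' ' then cur :: pvS [] rest else pvS (cur ++ [c]) rest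

-- what clean_line contributes for one character
def pvF (c : Char) : List Char :=
  if c ∈ ltRemove then []
  else if c ∈ "-=+_".toList then [' ']
  else if c ∈ "?.!".toList then [' ', c]
  else [c]

-- keep only non-empty pieces, as Strings
def pvTok (l : List (List Char)) : List String :=
  (l.filter (fun t => decide (0 < t.length))).map String.ofList

theorem pvTok_cons (x : List Char) (r : List (List Char)) :
    pvTok (x :: r) = (if x = [] then [] else [String.ofList x]) ++ pvTok r := by
  cases x <;> simp [pvTok]

theorem splitOn_go_space (l : List Char) : ∀ (fuel : Nat) (cur : List Char) (acc : List (List Char)),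
    l.length ≤ fuel →
    PySem.Chars.splitOn.go [' '] fuel l cur acc = acc.reverse ++ pvS cur.reverse l := by
  induction l with
  | nil =>
    intro fuel cur acc _
    cases fuel <;> rw [PySem.Chars.splitOn.go.eq_def] <;> simp [pvS]
  | cons c rest ih =>
    intro fuel cur acc hlen
    cases fuel with
    | zero => simp at hlen
    | succ n =>
      simp only [List.length_cons] at hlen
      rw [PySem.Chars.splitOn.go.eq_def]
      by_cases hc : c = ' '
      · subst hc
        simp only [List.isPrefixOf, Bool.and_eq_true, beq_iff_eq]
        rw [if_pos (by simp)]
        simp only [List.length_singleton, List.drop_succ_cons, List.drop_zero]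
        rw [ih n [] (cur.reverse :: acc) (by omega)]
        simp [pvS]
      · simp only [List.isPrefixOf, Bool.and_eq_true, beq_iff_eq]
        rw [if_neg (by simp [Ne.symm hc])]
        rw [ih n (c :: cur) acc (by omega)]
        simp [pvS, hc]

theorem splitOn_space (l : List Char) :
    PySem.Chars.splitOn l [' '] = pvS [] l := by
  show PySem.Chars.splitOn.go [' '] (l.length + 1) l [] [] = pvS [] l
  rw [splitOn_go_space l (l.length + 1) [] [] (by omega)]
  simp

theorem cleanLine_flatMap (cs : List Char) : ∀ acc : List Char,
    cs.foldl (fun acc c =>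
      if c ∈ ltRemove then acc
      else if c ∈ "-=+_".toList then acc ++ [' ']
      else if c ∈ "?.!".toList then acc ++ [' ', c]
      else acc ++ [c]) acc = acc ++ cs.flatMap pvF := by
  induction cs with
  | nil => intro acc; simp
  | cons c rest ih =>
    intro acc
    simp only [List.foldl_cons, List.flatMap_cons, pvF]
    split_ifs <;> rw [ih] <;> simp

theorem pvS_space (cur l : List Char) : pvS cur (' ' :: l) = cur :: pvS [] l := by
  simp [pvS]

theorem bRemove_eq : bRemove = ltRemove := by decide
theorem bSep_eq : bSep = " -=+_".toList := by decide
theorem bPunct_eq : bPunct = "?.!".toList := by decide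

theorem main_lemma (cs : List Char) : ∀ buf : List Char,
    pvTok (pvS buf (cs.flatMap pvF)) = bLoop cs buf := by
  induction cs with
  | nil =>
    intro buf
    simp only [List.flatMap_nil, pvS, bLoop]
    cases buf <;> simp [pvTok]
  | cons c rest ih =>
    intro buf
    simp only [List.flatMap_cons, bLoop, bRemove_eq, bSep_eq, bPunct_eq]
    by_cases hr : c ∈ ltRemove
    · rw [if_pos hr]
      simp only [pvF, if_pos hr, List.nil_append]
      exact ih buf
    · rw [if_neg hr]
      by_cases hs : c ∈ " -=+_".toList
      · rw [if_pos hs]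
        have hf : pvF c = [' '] := by fin_cases hs <;> decide
        rw [hf]
        simp only [List.cons_append, List.nil_append, pvS_space, pvTok_cons]
        rw [ih []]
      · rw [if_neg hs]
        have hc : ¬ c = ' ' := by intro h; subst h; exact hs (by decide)
        by_cases hp : c ∈ "?.!".toList
        · rw [if_pos hp]
          have hf : pvF c = [' ', c] := by fin_cases hp <;> decide
          rw [hf]
          simp only [List.cons_append, List.nil_append, pvS_space, pvTok_cons]
          rw [show pvS [] (c :: rest.flatMap pvF) = pvS [c] (rest.flatMap pvF) by
            simp [pvS, hc]]
          rw [ih [c]]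
        · rw [if_neg hp]
          have h1 : c ∉ "-=+_".toList := by
            intro h; apply hs; simp at h ⊢; tauto
          have hf : pvF c = [c] := by
            simp only [pvF, if_neg hr, if_neg h1, if_neg hp]
          rw [hf]
          simp only [List.singleton_append]
          rw [show pvS buf (c :: rest.flatMap pvF) = pvS (buf ++ [c]) (rest.flatMap pvF) by
            simp [pvS, hc]]
          exact ih (buf ++ [c])

-- ===== VERDICT (by name: the statement is the Claim_ definition above) =====
theorem line_to_tokens_spec : Claim_equal_line_to_tokens := by
  intro line _
  show line_to_tokens line = line_to_tokens_alt line
  unfold line_to_tokens line_to_tokens_alt cleanLine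
  rw [cleanLine_flatMap, List.nil_append, splitOn_space]
  exact main_lemma line.toList []
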